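-- pv_equiv track=rewrite | github.com/daniel-reich/ubiquitous-fiesta | tftN3EdkSPfXxzWpi_1.py | sentence_searcher
-- ===== SOURCE A (Python) =====
-- def sentence_searcher(s, n):
--     lst, idx, lst_idx = s[:-1].split(". "), 0, []
--     for st in lst:
--         idx += len(st.split(" "))
--         lst_idx.append(idx)
--     n += lst_idx[-1] if n < 0 else 0
--     for i, st in enumerate(lst):
--         if n < lst_idx[i]:
--             return "{}.".format(st)
--     return "n is out of range"
-- ===== SOURCE B (Python) =====
-- def sentence_searcher(s, n):
--     words = s[:-1].split(" ")
--     if n < 0: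
--         n += len(words)
--     if n >= len(words):
--         return "n is out of range"
--     sent = []
--     for i, w in enumerate(words):
--         if w.endswith(".") and i + 1 < len(words):
--             if n <= i:
--                 return " ".join(sent + [w[:-1]]) + "."
--             sent = []
--         else:
--             sent.append(w)
--     return " ".join(sent) + "."
-- ===== Notes on version B (the rewrite author's own statement) =====
-- stated objective: alternative
-- what changed: B never splits the text into sentences: it works on the flat word list s[:-1].split(" "), detects sentence boundaries as non-final words ending in '.', compares n directly against the word index, and rebuilds the sentence by joining the accumulated words; A's per-sentence split and prefix-sum index table disappear.
import Mathlib
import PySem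

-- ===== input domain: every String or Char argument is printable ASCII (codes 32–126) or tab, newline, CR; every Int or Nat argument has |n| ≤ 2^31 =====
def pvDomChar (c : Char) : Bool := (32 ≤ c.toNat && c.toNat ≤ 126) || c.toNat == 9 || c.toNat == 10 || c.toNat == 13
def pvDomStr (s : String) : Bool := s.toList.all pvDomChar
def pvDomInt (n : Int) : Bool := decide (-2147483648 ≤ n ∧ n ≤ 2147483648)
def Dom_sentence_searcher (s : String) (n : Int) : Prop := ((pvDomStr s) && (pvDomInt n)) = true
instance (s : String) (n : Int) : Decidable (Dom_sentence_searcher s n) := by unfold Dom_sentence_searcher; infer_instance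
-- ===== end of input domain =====

-- B never splits the text into sentences: it scans the flat word list s[:-1].split(" "),
-- detects sentence boundaries as non-final words ending in '.', compares n against the
-- word index directly, and rebuilds the sentence by joining the accumulated words
-- (objective: alternative algorithm, same cost).

-- ===== PORT A =====
-- strings handled on the List Char side throughout (PySem.Str.split? is the ofList-image
-- of PySem.Chars.splitOn, so this is the same computation)
-- second loop of A: 'for i, st in enumerate(lst): if n < lst_idx[i]: return "{}.".format(st)',
-- walked as the zip of lst with lst_idx
def pvFindA (n : Int) : List (List Char × Int) → String
  | [] => "n is out of range"
  | (st, ix) :: rest => if n < ix then String.ofList (st ++ ['.']) else pvFindA n rest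

def sentence_searcher (s : String) (n : Int) : String :=
  let lst := PySem.Chars.splitOn (PySem.List.slice s.toList none (some (-1))) ['.', ' ']
  let p := lst.foldl (fun (p : Int × List Int) st =>
      let idx := p.1 + ((PySem.Chars.splitOn st [' ']).length : Int)
      (idx, p.2 ++ [idx])) ((0 : Int), ([] : List Int))
  let lst_idx := p.2
  -- lst_idx[-1]: lst is never empty in Python, so the index never fails; the getD 0 default is unreachable
  let n := n + (if n < 0 then (PySem.List.pyGet? lst_idx (-1)).getD 0 else 0)
  pvFindA n (lst.zip lst_idx)

-- ===== PORT B =====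
-- 'for i, w in enumerate(words): …' with the accumulator sent and two early returns
def pvLoopB (n : Int) (total : Nat) : Nat → List (List Char) → List (List Char) → String
  | _, sent, [] => String.ofList (PySem.Chars.join [' '] sent ++ ['.'])
  | i, sent, w :: rest =>
      if PySem.Chars.endswith w ['.'] && decide (i + 1 < total) then
        if n ≤ (i : Int) then
          String.ofList (PySem.Chars.join [' '] (sent ++ [PySem.List.slice w none (some (-1))]) ++ ['.'])
        else pvLoopB n total (i + 1) [] rest
      else pvLoopB n total (i + 1) (sent ++ [w]) rest

def sentence_searcher_alt (s : String) (n : Int) : String :=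
  let words := PySem.Chars.splitOn (PySem.List.slice s.toList none (some (-1))) [' ']
  let n := if n < 0 then n + (words.length : Int) else n
  if (words.length : Int) ≤ n then "n is out of range"
  else pvLoopB n words.length 0 [] words

-- ===== PRECONDITION & SPEC =====
def Spec_sentence_searcher (s : String) (n : Int) (out : String) : Prop := out = sentence_searcher_alt s n
instance (s : String) (n : Int) (out : String) : Decidable (Spec_sentence_searcher s n out) := by unfold Spec_sentence_searcher; infer_instance

-- ===== CLAIM (what is proved, stated in full; the proofs are below) =====
def Claim_equal_sentence_searcher : Prop := ∀ (s : String) (n : Int), Dom_sentence_searcher s n → Spec_sentence_searcher s n (sentence_searcher s n)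

-- ===== LEMMAS AND PROOFS =====

-- structural views of splitOn for the two separators
def pvHconsL (a : List Char) : List (List Char) → List (List Char)
  | [] => [a]
  | p :: ps => (a ++ p) :: ps

def pvHcons (c : Char) : List (List Char) → List (List Char)
  | [] => [[c]]
  | p :: ps => (c :: p) :: ps

def pvSp1 : List Char → List (List Char)
  | [] => [[]]
  | c :: t => if c = ' ' then [] :: pvSp1 t else pvHcons c (pvSp1 t)

def pvSp2 : List Char → List (List Char)
  | [] => [[]]
  | [c] => [[c]]
  | c :: d :: t => if c = '.' ∧ d = ' ' then [] :: pvSp2 t else pvHcons c (pvSp2 (d :: t))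

-- grouping of the word list into sentence segments (word lists)
def pvHcons2 (w : List Char) : List (List (List Char)) → List (List (List Char))
  | [] => [[w]]
  | g :: gs => (w :: g) :: gs

def pvSegs : List (List Char) → List (List (List Char))
  | [] => []
  | [w] => [[w]]
  | w :: x :: ws =>
      if PySem.Chars.endswith w ['.'] then [w.dropLast] :: pvSegs (x :: ws)
      else pvHcons2 w (pvSegs (x :: ws))

-- the common reading both programs are reduced to: scan the segments with a word-index base
def pvFindSeg (n : Int) : Int → List (List (List Char)) → String
  | _, [] => "n is out of range"
  | _, [g] => String.ofList (PySem.Chars.join [' '] g ++ ['.'])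
  | a, g :: g' :: gs =>
      if n < a + g.length then String.ofList (PySem.Chars.join [' '] g ++ ['.'])
      else pvFindSeg n (a + g.length) (g' :: gs)

-- A's first loop data
def pvWc (st : List Char) : Int := ((PySem.Chars.splitOn st [' ']).length : Int)

def pvPref (a : Int) : List (List Char) → List Int
  | [] => []
  | st :: rest => (a + pvWc st) :: pvPref (a + pvWc st) rest

theorem pvHcons_ne_nil (c : Char) (ps : List (List Char)) : pvHcons c ps ≠ [] := by
  cases ps <;> simp [pvHcons]

theorem pvSp1_ne_nil (t : List Char) : pvSp1 t ≠ [] := by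
  cases t with
  | nil => simp [pvSp1]
  | cons c t =>
    simp only [pvSp1]; split
    · simp
    · exact pvHcons_ne_nil _ _

theorem pvSp2_ne_nil (t : List Char) : pvSp2 t ≠ [] := by
  match t with
  | [] => simp [pvSp2]
  | [c] => simp [pvSp2]
  | c :: d :: t =>
    simp only [pvSp2]; split
    · simp
    · exact pvHcons_ne_nil _ _

theorem pvHconsL_nil_of_ne (ps : List (List Char)) (h : ps ≠ []) : pvHconsL [] ps = ps := by
  cases ps with
  | nil => exact absurd rfl h
  | cons p ps => simp [pvHconsL]

theorem pvHconsL_hcons (a : List Char) (c : Char) (ps : List (List Char)) :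
    pvHconsL a (pvHcons c ps) = pvHconsL (a ++ [c]) ps := by
  cases ps <;> simp [pvHcons, pvHconsL]

theorem pvGo1 : ∀ (fuel : Nat) (l cur : List Char) (acc : List (List Char)), l.length < fuel →
    PySem.Chars.splitOn.go [' '] fuel l cur acc = acc.reverse ++ pvHconsL cur.reverse (pvSp1 l) := by
  intro fuel
  induction fuel with
  | zero => intro l cur acc h; omega
  | succ f ih =>
    intro l cur acc h
    cases l with
    | nil => simp [PySem.Chars.splitOn.go, pvSp1, pvHconsL]
    | cons c rest =>
      rw [PySem.Chars.splitOn.go]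
      by_cases hc : c = ' '
      · subst hc
        have hp : [' '].isPrefixOf (' ' :: rest) = true := by simp [List.isPrefixOf]
        simp only [hp, if_pos]
        rw [show List.drop [' '].length (' ' :: rest) = rest by simp]
        rw [ih rest [] (cur.reverse :: acc) (by simp at h ⊢; omega)]
        simp only [pvSp1, if_pos rfl, pvHconsL, List.reverse_cons, List.reverse_nil,
          List.nil_append, List.append_assoc, List.singleton_append, List.cons_append]
        cases hx : pvSp1 rest with
        | nil => exact absurd hx (pvSp1_ne_nil rest)
        | cons p ps => simp
      · have hp : [' '].isPrefixOf (c :: rest) = false := by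
          simp [List.isPrefixOf]; exact fun h' => absurd h'.symm hc
        simp only [hp, Bool.false_eq_true, if_neg, not_false_iff]
        rw [ih rest (c :: cur) acc (by simp at h ⊢; omega)]
        simp [pvSp1, hc, pvHconsL_hcons]

theorem pvGo2 : ∀ (fuel : Nat) (l cur : List Char) (acc : List (List Char)), l.length < fuel →
    PySem.Chars.splitOn.go ['.', ' '] fuel l cur acc = acc.reverse ++ pvHconsL cur.reverse (pvSp2 l) := by
  intro fuel
  induction fuel with
  | zero => intro l cur acc h; omega
  | succ f ih =>
    intro l cur acc h
    match l with
    | [] => simp [PySem.Chars.splitOn.go, pvSp2, pvHconsL]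
    | c :: rest =>
      rw [PySem.Chars.splitOn.go]
      by_cases hp : ['.', ' '].isPrefixOf (c :: rest) = true
      · match rest with
        | [] => simp [List.isPrefixOf] at hp
        | d :: t =>
        simp only [List.isPrefixOf, Bool.and_eq_true, beq_iff_eq] at hp
        obtain ⟨h1, h2, -⟩ := hp
        subst h1; subst h2
        have hp : ['.', ' '].isPrefixOf ('.' :: ' ' :: t) = true := by simp [List.isPrefixOf]
        simp only [hp, if_pos]
        rw [show List.drop ['.', ' '].length ('.' :: ' ' :: t) = t by simp]
        rw [ih t [] (cur.reverse :: acc) (by simp at h ⊢; omega)]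
        simp only [pvSp2, pvHconsL, List.reverse_cons, List.reverse_nil,
          List.nil_append, List.append_assoc, List.singleton_append, List.cons_append,
          if_pos (⟨rfl, rfl⟩ : ('.':Char) = '.' ∧ (' ':Char) = ' ')]
        cases hx : pvSp2 t with
        | nil => exact absurd hx (pvSp2_ne_nil t)
        | cons p ps => simp
      · simp only [Bool.not_eq_true] at hp
        simp only [hp, Bool.false_eq_true, if_neg, not_false_iff]
        rw [ih rest (c :: cur) acc (by simp at h ⊢; omega)]
        match rest with
        | [] => simp [pvSp2, pvHcons, pvHconsL]
        | d :: t =>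
          have hnd : ¬ (c = '.' ∧ d = ' ') := by
            intro ⟨h1, h2⟩; subst h1; subst h2; simp [List.isPrefixOf] at hp
          simp [pvSp2, hnd, pvHconsL_hcons]

theorem pvSplitOn_space (t : List Char) : PySem.Chars.splitOn t [' '] = pvSp1 t := by
  unfold PySem.Chars.splitOn
  rw [pvGo1 (t.length + 1) t [] [] (by omega)]
  simp [pvHconsL_nil_of_ne _ (pvSp1_ne_nil t)]

theorem pvSplitOn_dot (t : List Char) : PySem.Chars.splitOn t ['.', ' '] = pvSp2 t := by
  unfold PySem.Chars.splitOn
  rw [pvGo2 (t.length + 1) t [] [] (by omega)]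
  simp [pvHconsL_nil_of_ne _ (pvSp2_ne_nil t)]

-- endswith "." facts
theorem pvEndsDot_nil : PySem.Chars.endswith [] ['.'] = false := by decide

theorem pvEndsDot_single (c : Char) : (PySem.Chars.endswith [c] ['.'] = true) ↔ c = '.' := by
  rw [PySem.Chars.endswith_iff]
  simp [List.suffix_cons_iff, eq_comm]

theorem pvEndsDot_cons (c : Char) (w : List Char) (h : w ≠ []) :
    PySem.Chars.endswith (c :: w) ['.'] = PySem.Chars.endswith w ['.'] := by
  rw [Bool.eq_iff_iff, PySem.Chars.endswith_iff, PySem.Chars.endswith_iff, List.suffix_cons_iff]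
  constructor
  · rintro (he | hs)
    · exact absurd (congrArg List.length he) (by cases w <;> simp_all)
    · exact hs
  · exact Or.inr

-- words produced by pvSp1 contain no space
theorem pvSp1_no_space (t : List Char) : ∀ w ∈ pvSp1 t, ' ' ∉ w := by
  induction t with
  | nil => simp [pvSp1]
  | cons c t ih =>
    intro w hw
    simp only [pvSp1] at hw
    by_cases hc : c = ' '
    · rw [if_pos hc] at hw
      rcases List.mem_cons.mp hw with rfl | hw
      · simp
      · exact ih w hw
    · rw [if_neg hc] at hw
      cases hx : pvSp1 t with
      | nil => exact absurd hx (pvSp1_ne_nil t)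
      | cons p ps =>
        rw [hx] at hw
        simp only [pvHcons, List.mem_cons] at hw
        rcases hw with rfl | hw
        · intro hm
          rcases List.mem_cons.mp hm with rfl | hm'
          · exact hc rfl
          · exact ih p (by rw [hx]; exact List.mem_cons_self ..) hm'
        · exact ih w (by rw [hx]; exact List.mem_cons_of_mem _ hw)

-- pvSp1 of a single space-free word / of word ++ ' ' ++ rest
theorem pvSp1_single (w : List Char) (h : ' ' ∉ w) : pvSp1 w = [w] := by
  induction w with
  | nil => simp [pvSp1]
  | cons c t ih =>
    have hc : c ≠ ' ' := fun hc => h (by simp [hc])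
    simp only [pvSp1, if_neg hc, ih (fun hm => h (List.mem_cons_of_mem _ hm))]
    simp [pvHcons]

theorem pvSp1_space_append (a r : List Char) (h : ' ' ∉ a) :
    pvSp1 (a ++ ' ' :: r) = a :: pvSp1 r := by
  induction a with
  | nil => simp [pvSp1]
  | cons c t ih =>
    have hc : c ≠ ' ' := fun hc => h (by simp [hc])
    simp only [List.cons_append, pvSp1, if_neg hc, ih (fun hm => h (List.mem_cons_of_mem _ hm))]
    simp [pvHcons]

theorem pvSp1_join (g : List (List Char)) (hne : g ≠ []) (h : ∀ w ∈ g, ' ' ∉ w) :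
    pvSp1 (PySem.Chars.join [' '] g) = g := by
  induction g with
  | nil => exact absurd rfl hne
  | cons w g ih =>
    cases g with
    | nil => simp [PySem.Chars.join_singleton, pvSp1_single w (h w (by simp))]
    | cons w' g' =>
      rw [PySem.Chars.join_cons_cons]
      rw [show w ++ [' '] ++ PySem.Chars.join [' '] (w' :: g') = w ++ ' ' :: PySem.Chars.join [' '] (w' :: g') by simp]
      rw [pvSp1_space_append _ _ (h w (by simp))]
      rw [ih (by simp) (fun x hx => h x (List.mem_cons_of_mem _ hx))]

-- segment invariants
theorem pvSegs_ne_nil (ws : List (List Char)) (h : ws ≠ []) : pvSegs ws ≠ [] := by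
  match ws with
  | [w] => simp [pvSegs]
  | w :: x :: ws =>
    simp only [pvSegs]; split
    · simp
    · cases hx : pvSegs (x :: ws) <;> simp [pvHcons2]

theorem pvSegs_groups (ws : List (List Char)) (h : ws ≠ []) (hs : ∀ w ∈ ws, ' ' ∉ w) :
    ∀ g ∈ pvSegs ws, g ≠ [] ∧ ∀ w ∈ g, ' ' ∉ w := by
  match ws with
  | [w] =>
    intro g hg
    simp only [pvSegs, List.mem_singleton] at hg
    subst hg
    exact ⟨by simp, by simpa using hs w (by simp)⟩
  | w :: x :: ws =>
    intro g hg
    have ihs : ∀ w' ∈ (x :: ws), ' ' ∉ w' := fun w' hw' => hs w' (List.mem_cons_of_mem _ hw')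
    have ih := pvSegs_groups (x :: ws) (by simp) ihs
    simp only [pvSegs] at hg
    split at hg
    · rcases List.mem_cons.mp hg with rfl | hg
      · refine ⟨by simp, ?_⟩
        intro w' hw'
        simp only [List.mem_singleton] at hw'
        subst hw'
        exact fun hm => hs w (by simp) (List.dropLast_subset _ hm)
      · exact ih g hg
    · cases hx : pvSegs (x :: ws) with
      | nil => exact absurd hx (pvSegs_ne_nil _ (by simp))
      | cons g1 gs =>
        rw [hx] at hg
        simp only [pvHcons2, List.mem_cons] at hg
        rcases hg with rfl | hg
        · have hg1 := ih g1 (by rw [hx]; simp)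
          refine ⟨by simp, ?_⟩
          intro w' hw'
          rcases List.mem_cons.mp hw' with rfl | hw'
          · exact hs w' (by simp)
          · exact hg1.2 w' hw'
        · exact ih g (by rw [hx]; exact List.mem_cons_of_mem _ hg)

theorem pvSegs_sum (ws : List (List Char)) (h : ws ≠ []) :
    ((pvSegs ws).map List.length).sum = ws.length := by
  match ws with
  | [w] => simp [pvSegs]
  | w :: x :: ws =>
    have ih := pvSegs_sum (x :: ws) (by simp)
    simp only [pvSegs]
    split
    · rw [List.map_cons, List.sum_cons, ih]
      simp only [List.length_cons, List.length_nil]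
      omega
    · cases hx : pvSegs (x :: ws) with
      | nil => exact absurd hx (pvSegs_ne_nil _ (by simp))
      | cons g1 gs =>
        rw [hx] at ih
        simp only [pvHcons2, List.map_cons, List.sum_cons, List.length_cons] at ih ⊢
        omega

-- the pieces A splits off are exactly the joined segments of B's word list
theorem pvSp1_head_empty (d : Char) (t : List Char) (l : List (List Char))
    (h : pvSp1 (d :: t) = [] :: l) (hl : l ≠ []) : d = ' ' := by
  by_contra hd
  simp only [pvSp1, if_neg hd] at h
  cases hx : pvSp1 t with
  | nil => exact absurd hx (pvSp1_ne_nil t)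
  | cons p ps => rw [hx] at h; simp [pvHcons] at h

theorem pvEndsDot_single_false (c : Char) (h : c ≠ '.') :
    PySem.Chars.endswith [c] ['.'] = false := by
  rw [Bool.eq_false_iff, Ne, pvEndsDot_single]; exact h

theorem pvSp2_eq_segs (t : List Char) :
    pvSp2 t = (pvSegs (pvSp1 t)).map (PySem.Chars.join [' ']) := by
  match t with
  | [] => simp [pvSp1, pvSp2, pvSegs, PySem.Chars.join_singleton]
  | [c] =>
    by_cases hc : c = ' '
    · subst hc
      decide
    · simp [pvSp1, pvSp2, hc, pvHcons, pvSegs, PySem.Chars.join_singleton]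
  | c :: d :: t =>
    have ih : pvSp2 (d :: t) = (pvSegs (pvSp1 (d :: t))).map (PySem.Chars.join [' ']) :=
      pvSp2_eq_segs (d :: t)
    by_cases hcd : c = '.' ∧ d = ' '
    · obtain ⟨rfl, rfl⟩ := hcd
      have iht : pvSp2 t = (pvSegs (pvSp1 t)).map (PySem.Chars.join [' ']) := pvSp2_eq_segs t
      simp only [pvSp2, if_pos (⟨rfl, rfl⟩ : ('.':Char) = '.' ∧ (' ':Char) = ' ')]
      have h1 : pvSp1 ('.' :: ' ' :: t) = ['.'] :: pvSp1 t := by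
        simp only [pvSp1, if_neg (by decide : ¬ ('.' : Char) = ' '), if_pos rfl]
        cases hx : pvSp1 t with
        | nil => exact absurd hx (pvSp1_ne_nil t)
        | cons p ps => simp [pvHcons]
      rw [h1]
      cases hx : pvSp1 t with
      | nil => exact absurd hx (pvSp1_ne_nil t)
      | cons p ps =>
        rw [hx] at iht
        simp only [pvSegs, if_pos (by decide : PySem.Chars.endswith ['.'] ['.'] = true)]
        simp [PySem.Chars.join_singleton, iht]
    · have hknd : pvSp2 (c :: d :: t) = pvHcons c (pvSp2 (d :: t)) := by
        simp [pvSp2, hcd]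
      rw [hknd, ih]
      by_cases hc : c = ' '
      · subst hc
        have h1 : pvSp1 (' ' :: d :: t) = [] :: pvSp1 (d :: t) := by simp [pvSp1]
        rw [h1]
        cases hx : pvSp1 (d :: t) with
        | nil => exact absurd hx (pvSp1_ne_nil _)
        | cons x xs =>
          cases hsg : pvSegs (x :: xs) with
          | nil => exact absurd hsg (pvSegs_ne_nil _ (by simp))
          | cons g1 gs =>
            have hg1 : g1 ≠ [] :=
              (pvSegs_groups (x :: xs) (by simp)
                (by rw [← hx]; exact pvSp1_no_space (d :: t)) g1 (by rw [hsg]; simp)).1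
            cases hg1x : g1 with
            | nil => exact absurd hg1x hg1
            | cons y ys =>
              subst hg1x
              simp only [pvSegs, pvEndsDot_nil, Bool.false_eq_true, if_neg, not_false_iff,
                hsg, pvHcons2, List.map_cons, pvHcons, PySem.Chars.join_cons_cons]
              simp
      · have h1 : pvSp1 (c :: d :: t) = pvHcons c (pvSp1 (d :: t)) := by
          simp [pvSp1, hc]
        rw [h1]
        cases hx : pvSp1 (d :: t) with
        | nil => exact absurd hx (pvSp1_ne_nil _)
        | cons x xs =>
          have hnospace : ∀ w ∈ (x :: xs), ' ' ∉ w := by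
            rw [← hx]; exact pvSp1_no_space (d :: t)
          simp only [pvHcons]
          cases hxs : xs with
          | nil =>
            simp [pvSegs, PySem.Chars.join_singleton]
          | cons x2 xs2 =>
            subst hxs
            cases hsg : pvSegs (x2 :: xs2) with
            | nil => exact absurd hsg (pvSegs_ne_nil _ (by simp))
            | cons g1 gs =>
            have hg1 : g1 ≠ [] :=
              (pvSegs_groups (x2 :: xs2) (by simp)
                (fun w hw => hnospace w (List.mem_cons_of_mem _ hw)) g1 (by rw [hsg]; simp)).1
            cases hg1x : g1 with
            | nil => exact absurd hg1x hg1
            | cons y ys =>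
            subst hg1x
            cases hxe : x with
            | nil =>
              subst hxe
              have hd : d = ' ' := pvSp1_head_empty d t (x2 :: xs2) hx (by simp)
              have hcdot : c ≠ '.' := fun h' => hcd ⟨h', hd⟩
              simp only [pvSegs, pvEndsDot_nil, pvEndsDot_single_false c hcdot,
                Bool.false_eq_true, if_neg, not_false_iff, hsg, pvHcons2,
                List.map_cons, pvHcons, PySem.Chars.join_cons_cons]
              simp
            | cons cx tx =>
              subst hxe
              have hcast : PySem.Chars.endswith (c :: cx :: tx) ['.'] = PySem.Chars.endswith (cx :: tx) ['.'] :=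
                pvEndsDot_cons c (cx :: tx) (by simp)
              cases hb : PySem.Chars.endswith (cx :: tx) ['.'] with
              | true =>
                have hdl : (c :: cx :: tx).dropLast = c :: (cx :: tx).dropLast := by simp
                simp only [pvSegs, hb, hcast, if_pos, List.map_cons,
                  PySem.Chars.join_singleton, pvHcons, hdl]
              | false =>
                simp only [pvSegs, hb, hcast, Bool.false_eq_true, if_neg, not_false_iff,
                  hsg, pvHcons2, List.map_cons, pvHcons, PySem.Chars.join_cons_cons]
                simp

-- A's first loop computes the running total and the prefix-sum table
theorem pvFoldl_eq (ss : List (List Char)) : ∀ (a : Int) (l : List Int),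
    ss.foldl (fun (p : Int × List Int) st =>
      let idx := p.1 + ((PySem.Chars.splitOn st [' ']).length : Int)
      (idx, p.2 ++ [idx])) (a, l)
      = (a + (ss.map pvWc).sum, l ++ pvPref a ss) := by
  induction ss with
  | nil => intro a l; simp [pvPref]
  | cons st rest ih =>
      intro a l
      simp only [List.foldl_cons, pvPref, ih]
      simp only [List.map_cons, List.sum_cons, Prod.mk.injEq, pvWc]
      exact ⟨by ring, by simp⟩

theorem pvGet_neg_one {α : Type} (xs : List α) : PySem.List.pyGet? xs (-1) = xs.getLast? := by
  cases xs with
  | nil => simp [PySem.List.pyGet?, PySem.List.pyIdx?]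
  | cons a as =>
      simp only [PySem.List.pyGet?, PySem.List.pyIdx?, List.length_cons,
        List.getLast?_eq_getElem?]
      have h1 : ¬ ((0 : Int) ≤ -1) := by omega
      have h2 : -((as.length + 1 : Nat) : Int) ≤ -1 := by push_cast; omega
      rw [if_neg h1, if_pos h2]
      simp

theorem pvPref_last (ss : List (List Char)) : ∀ (a : Int), ss ≠ [] →
    PySem.List.pyGet? (pvPref a ss) (-1) = some (a + (ss.map pvWc).sum) := by
  induction ss with
  | nil => intro a h; exact absurd rfl h
  | cons st rest ih =>
      intro a _
      cases hr : rest with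
      | nil => simp [pvPref, PySem.List.pyGet?, PySem.List.pyIdx?]
      | cons y ys =>
          have hih := ih (a + pvWc st) (by simp [hr])
          rw [hr] at hih
          rw [pvGet_neg_one] at hih ⊢
          simp only [pvPref, List.getLast?_cons_cons] at hih ⊢
          rw [hih]
          simp only [List.map_cons, List.sum_cons]
          ring_nf

theorem pvWc_nonneg (st : List Char) : 0 ≤ pvWc st := by
  simp [pvWc]

theorem pvWc_join (g : List (List Char)) (hne : g ≠ []) (h : ∀ w ∈ g, ' ' ∉ w) :
    pvWc (PySem.Chars.join [' '] g) = (g.length : Int) := by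
  simp [pvWc, pvSplitOn_space, pvSp1_join g hne h]

-- A's second loop, out of range
theorem pvFindA_oor (P : List (List Char)) : ∀ (a n : Int),
    a + (P.map pvWc).sum ≤ n → pvFindA n (P.zip (pvPref a P)) = "n is out of range" := by
  induction P with
  | nil => intro a n _; simp [pvFindA]
  | cons p P ih =>
    intro a n h
    have hsum : 0 ≤ (P.map pvWc).sum :=
      List.sum_nonneg (by rintro x hx; obtain ⟨y, -, rfl⟩ := List.mem_map.mp hx; exact pvWc_nonneg y)
    simp only [List.map_cons, List.sum_cons] at h
    simp only [pvPref, List.zip_cons_cons, pvFindA]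
    rw [if_neg (by omega)]
    exact ih (a + pvWc p) n (by omega)

-- A's second loop = segment scan
theorem pvFindA_eq_seg (gs : List (List (List Char))) : ∀ (a n : Int),
    gs ≠ [] → (∀ g ∈ gs, g ≠ [] ∧ ∀ w ∈ g, ' ' ∉ w) →
    n < a + ((gs.map List.length).sum : Int) →
    pvFindA n ((gs.map (PySem.Chars.join [' '])).zip
        (pvPref a (gs.map (PySem.Chars.join [' '])))) = pvFindSeg n a gs := by
  match gs with
  | [] => intro a n h; exact absurd rfl h
  | [g] =>
    intro a n _ hgood hlt
    obtain ⟨hg, hsp⟩ := hgood g (by simp)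
    simp only [List.map_cons, List.map_nil, pvPref, List.zip_cons_cons, List.zip_nil_right,
      pvFindA, pvFindSeg]
    rw [pvWc_join g hg hsp]
    rw [if_pos (by simpa using hlt)]
  | g :: g' :: gs =>
    intro a n _ hgood hlt
    obtain ⟨hg, hsp⟩ := hgood g (by simp)
    have ih := pvFindA_eq_seg (g' :: gs) (a + (g.length : Int)) n (by simp)
      (fun x hx => hgood x (List.mem_cons_of_mem _ hx))
      (by simp only [List.map_cons, List.sum_cons] at hlt ⊢; push_cast at hlt ⊢; omega)
    simp only [List.map_cons, pvPref, List.zip_cons_cons, pvFindA, pvFindSeg]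
    rw [pvWc_join g hg hsp]
    split
    · rfl
    · exact ih

-- B's loop = segment scan
theorem pvLoopB_cons (n : Int) (total i : Nat) (sent : List (List Char)) (w : List Char)
    (rest : List (List Char)) :
    pvLoopB n total i sent (w :: rest)
      = if PySem.Chars.endswith w ['.'] && decide (i + 1 < total) then
          if n ≤ (i : Int) then
            String.ofList (PySem.Chars.join [' '] (sent ++ [PySem.List.slice w none (some (-1))]) ++ ['.'])
          else pvLoopB n total (i + 1) [] rest
        else pvLoopB n total (i + 1) (sent ++ [w]) rest := rfl

theorem pvLoopB_eq_seg (ws : List (List Char)) : ∀ (n : Int) (i : Nat) (sent : List (List Char)),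
    ws ≠ [] →
    pvLoopB n (i + ws.length) i sent ws
      = pvFindSeg n ((i : Int) - sent.length)
          (match pvSegs ws with
           | [] => [sent]
           | g :: gs => (sent ++ g) :: gs) := by
  match ws with
  | [] => intro n i sent h; exact absurd rfl h
  | [w] =>
    intro n i sent _
    rw [pvLoopB_cons]
    rw [show decide (i + 1 < i + ([w] : List (List Char)).length) = false from by simp]
    rw [Bool.and_false]
    rw [if_neg (by simp)]
    simp [pvLoopB, pvFindSeg, pvSegs]
  | w :: x :: ws =>
    intro n i sent _
    have hlen : (w :: x :: ws).length = ws.length + 2 := by simp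
    rw [hlen, pvLoopB_cons]
    have hdec : decide (i + 1 < i + (ws.length + 2)) = true := decide_eq_true (by omega)
    rw [hdec, Bool.and_true]
    cases hsg : pvSegs (x :: ws) with
    | nil => exact absurd hsg (pvSegs_ne_nil _ (by simp))
    | cons g1 gs =>
    have ih := pvLoopB_eq_seg (x :: ws) n (i + 1)
    cases hb : PySem.Chars.endswith w ['.'] with
    | true =>
      rw [if_pos rfl, PySem.List.slice_to_neg_one]
      conv_rhs => rw [pvSegs]
      rw [if_pos hb, hsg]
      have hbase : ((i : Int) - sent.length) + ((sent ++ [w.dropLast]).length : Int)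
          = (i : Int) + 1 := by push_cast [List.length_append, List.length_singleton]; ring
      show _ = pvFindSeg n ((i : Int) - sent.length) ((sent ++ [w.dropLast]) :: g1 :: gs)
      rw [pvFindSeg, hbase]
      simp only [Int.lt_add_one_iff]
      split
      · rfl
      · have hih := ih [] (by simp)
        rw [show (i + 1) + (x :: ws).length = i + (ws.length + 2) from by simp only [List.length_cons]; omega] at hih
        rw [hih, hsg]
        simp
    | false =>
      rw [if_neg (by simp)]
      have hih := ih (sent ++ [w]) (by simp)
      rw [show (i + 1) + (x :: ws).length = i + (ws.length + 2) from by simp only [List.length_cons]; omega] at hih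
      rw [hih, hsg]
      conv_rhs => rw [pvSegs]
      rw [if_neg (by simp [hb]), hsg]
      show pvFindSeg n (((i + 1 : Nat) : Int) - ((sent ++ [w]).length : Int)) ((sent ++ [w] ++ g1) :: gs)
      = pvFindSeg n ((i : Int) - (sent.length : Int)) ((sent ++ (w :: g1)) :: gs)
      have hbase : ((i + 1 : Nat) : Int) - ((sent ++ [w]).length : Int)
          = (i : Int) - sent.length := by push_cast [List.length_append, List.length_singleton]; ring
      rw [hbase]
      simp

-- ===== VERDICT (by name: the statement is the Claim_ definition above) =====
theorem sentence_searcher_spec : Claim_equal_sentence_searcher := by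
  intro s n _
  unfold Spec_sentence_searcher sentence_searcher sentence_searcher_alt
  simp only [pvFoldl_eq, List.nil_append]
  simp only [pvSplitOn_space, pvSplitOn_dot]
  set t := PySem.List.slice s.toList none (some (-1)) with ht
  set ws := pvSp1 t with hws
  have hwsne : ws ≠ [] := pvSp1_ne_nil t
  have hnospace : ∀ w ∈ ws, ' ' ∉ w := pvSp1_no_space t
  have hgsne : pvSegs ws ≠ [] := pvSegs_ne_nil ws hwsne
  have hgood : ∀ g ∈ pvSegs ws, g ≠ [] ∧ ∀ w ∈ g, ' ' ∉ w := pvSegs_groups ws hwsne hnospace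
  have hpieces : pvSp2 t = (pvSegs ws).map (PySem.Chars.join [' ']) := pvSp2_eq_segs t
  have hsum : ((pvSp2 t).map pvWc).sum = (ws.length : Int) := by
    rw [hpieces, List.map_map]
    rw [List.map_congr_left (fun g hg => by
      simpa using pvWc_join g (hgood g hg).1 (hgood g hg).2)]
    rw [show (fun g : List (List Char) => (g.length : Int)) = (Nat.cast ∘ List.length) from rfl]
    rw [← List.map_map, ← Nat.cast_list_sum, pvSegs_sum ws hwsne]
  have hlast : PySem.List.pyGet? (pvPref 0 (pvSp2 t)) (-1) = some (ws.length : Int) := by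
    rw [pvPref_last (pvSp2 t) 0 (pvSp2_ne_nil t), hsum]
    norm_num
  rw [hlast]
  have hn' : n + (if n < 0 then ((some (ws.length : Int)).getD 0) else 0)
      = (if n < 0 then n + (ws.length : Int) else n) := by
    split <;> simp
  rw [hn']
  set n' := if n < 0 then n + (ws.length : Int) else n with hn'def
  by_cases hrange : (ws.length : Int) ≤ n'
  · rw [if_pos hrange]
    exact pvFindA_oor (pvSp2 t) 0 n' (by rw [hsum]; omega)
  · rw [if_neg hrange]
    have hA : pvFindA n' ((pvSp2 t).zip (pvPref 0 (pvSp2 t))) = pvFindSeg n' 0 (pvSegs ws) := by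
      rw [hpieces]
      exact pvFindA_eq_seg (pvSegs ws) 0 n' hgsne hgood
        (by rw [← pvSegs_sum ws hwsne] at hrange; omega)
    have hB : pvLoopB n' ws.length 0 [] ws = pvFindSeg n' 0 (pvSegs ws) := by
      have := pvLoopB_eq_seg ws n' 0 [] hwsne
      rw [show 0 + ws.length = ws.length from by omega] at this
      rw [this]
      cases hsg : pvSegs ws with
      | nil => exact absurd hsg hgsne
      | cons g gs => simp
    rw [hA, hB]
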